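-- pv_equiv track=rewrite | github.com/sijadev/cortex-py | cortex-cli/cortex/core/rule_based_linker.py | add_links_to_section
-- ===== SOURCE A (Python) =====
-- from typing import Dict, List, Optional
--
-- def add_links_to_section(content: str, section_name: str, links: List[str], auto_create: bool = True) -> str:
--     """Add links to a specific section in markdown content"""
--     lines = content.split('\n')
--     section_pattern = f"## {section_name}"
--     section_found = False
--     insert_index = -1
--
--     # Find existing section
--     for i, line in enumerate(lines):
--         if line.strip() == section_pattern:
--             section_found = True
--             insert_index = i + 1
--             break
--
--     if not section_found and auto_create:
--         # Add section at the end
--         lines.extend([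
--             "",
--             section_pattern,
--             ""
--         ])
--         insert_index = len(lines)
--
--     if insert_index >= 0:
--         # Insert links
--         for link in links:
--             lines.insert(insert_index, link)
--             insert_index += 1
--
--     return '\n'.join(lines)
-- ===== SOURCE B (Python) =====
-- def add_links_to_section(content: str, section_name: str, links, auto_create: bool = True) -> str:
--     """Add links to a section in one streaming pass (no index bookkeeping, no list.insert)."""
--     pattern = f"## {section_name}"
--     out = []
--     found = False
--     for line in content.split('\n'):
--         out.append(line)
--         if not found and line.strip() == pattern:
--             found = True
--             out.extend(links)
--     if not found and auto_create:
--         out.extend(["", pattern, ""])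
--         out.extend(links)
--     return '\n'.join(out)
-- ===== Notes on version B (the rewrite author's own statement) =====
-- stated objective: simpler
-- what changed: Replaces A's locate-index-then-repeated-list.insert scheme with a single streaming pass that appends each line and injects the links (or the auto-created section) as it goes, eliminating insert_index bookkeeping and per-link list.insert shifting.
import Mathlib
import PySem

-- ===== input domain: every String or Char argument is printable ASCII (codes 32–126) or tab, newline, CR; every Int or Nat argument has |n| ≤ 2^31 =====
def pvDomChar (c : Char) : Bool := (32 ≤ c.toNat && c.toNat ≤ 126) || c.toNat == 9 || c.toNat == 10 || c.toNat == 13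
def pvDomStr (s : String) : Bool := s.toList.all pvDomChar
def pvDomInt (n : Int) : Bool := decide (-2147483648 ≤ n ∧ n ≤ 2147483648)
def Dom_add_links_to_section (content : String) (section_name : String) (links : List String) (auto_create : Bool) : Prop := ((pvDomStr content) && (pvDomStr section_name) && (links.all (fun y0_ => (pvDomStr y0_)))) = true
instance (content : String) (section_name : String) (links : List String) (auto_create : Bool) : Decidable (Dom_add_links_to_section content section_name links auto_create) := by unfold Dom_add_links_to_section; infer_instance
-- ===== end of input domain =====

-- B builds the result in one streaming pass (append each line, inject links on the first header hit)
-- instead of A's find-index-then-repeated-list.insert; same return value, no speed claim.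

-- ===== PORT A =====
-- A's enumerate/break loop: returns (section_found, insert_index) after the first match, else (false, -1).
def pvFind (pattern : String) : List String → Int → Bool × Int
  | [], _ => (false, -1)
  | l :: ls, i =>
    if PySem.Str.strip l == pattern then (true, i + 1) else pvFind pattern ls (i + 1)

-- A's 'for link in links: lines.insert(insert_index, link); insert_index += 1' loop.
def pvInsertAll (links : List String) (lines : List String) (idx : Int) : List String :=
  (links.foldl (fun (st : List String × Int) link => (PySem.List.insert st.1 st.2 link, st.2 + 1)) (lines, idx)).1

def add_links_to_section (content : String) (section_name : String) (links : List String) (auto_create : Bool) : String :=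
  let lines := (PySem.Str.split? content "\n").getD []
  let pattern := "## " ++ section_name
  let fi := pvFind pattern lines 0
  let st :=
    if !fi.1 && auto_create then
      ((lines ++ ["", pattern, ""]), ((lines ++ ["", pattern, ""]).length : Int))
    else (lines, fi.2)
  let lines2 := if st.2 ≥ 0 then pvInsertAll links st.1 st.2 else st.1
  PySem.Str.join "\n" lines2

-- ===== PORT B =====
-- B's streaming loop: copies lines, injecting links right after the first header line; returns (out, found).
def pvStream (pattern : String) (links : List String) : List String → Bool → List String × Bool
  | [], found => ([], found)
  | l :: ls, found =>
    if !found && (PySem.Str.strip l == pattern) then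
      let r := pvStream pattern links ls true
      (l :: (links ++ r.1), r.2)
    else
      let r := pvStream pattern links ls found
      (l :: r.1, r.2)

def add_links_to_section_alt (content : String) (section_name : String) (links : List String) (auto_create : Bool) : String :=
  let pattern := "## " ++ section_name
  let r := pvStream pattern links ((PySem.Str.split? content "\n").getD []) false
  let out := if !r.2 && auto_create then r.1 ++ (["", pattern, ""] ++ links) else r.1
  PySem.Str.join "\n" out

-- ===== PRECONDITION & SPEC =====
def Spec_add_links_to_section (content : String) (section_name : String) (links : List String) (auto_create : Bool) (out : String) : Prop := out = add_links_to_section_alt content section_name links auto_create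
instance (content : String) (section_name : String) (links : List String) (auto_create : Bool) (out : String) : Decidable (Spec_add_links_to_section content section_name links auto_create out) := by unfold Spec_add_links_to_section; infer_instance

-- ===== CLAIM (what is proved, stated in full; the proofs are below) =====
def Claim_equal_add_links_to_section : Prop := ∀ (content : String) (section_name : String) (links : List String) (auto_create : Bool), Dom_add_links_to_section content section_name links auto_create → Spec_add_links_to_section content section_name links auto_create (add_links_to_section content section_name links auto_create)

-- ===== LEMMAS AND PROOFS =====

-- first index (0-based) of a line whose strip equals the pattern
def pvFirstIdx (pattern : String) : List String → Option Nat
  | [] => none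
  | l :: ls =>
    if PySem.Str.strip l == pattern then some 0 else (pvFirstIdx pattern ls).map (· + 1)

theorem pvFind_eq (pattern : String) : ∀ (ls : List String) (i : Int),
    pvFind pattern ls i =
      match pvFirstIdx pattern ls with
      | some k => (true, i + (k : Int) + 1)
      | none => (false, -1) := by
  intro ls
  induction ls with
  | nil => intro i; rfl
  | cons l ls ih =>
    intro i
    by_cases h : (PySem.Str.strip l == pattern) = true
    · simp [pvFind, pvFirstIdx, h]
    · simp only [pvFind, pvFirstIdx, h, if_neg, Bool.not_eq_true] at *
      rw [ih (i + 1)]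
      cases hk : pvFirstIdx pattern ls with
      | none => simp
      | some k => simp; ring

theorem pvFirstIdx_lt (pattern : String) : ∀ (ls : List String) (k : Nat),
    pvFirstIdx pattern ls = some k → k < ls.length := by
  intro ls
  induction ls with
  | nil => intro k h; simp [pvFirstIdx] at h
  | cons l ls ih =>
    intro k h
    by_cases hm : (PySem.Str.strip l == pattern) = true
    · simp [pvFirstIdx, hm] at h; simp only [List.length_cons]; omega
    · simp [pvFirstIdx, hm] at h
      obtain ⟨j, hj, rfl⟩ := h
      have := ih j hj
      simp only [List.length_cons]; omega

theorem pvInsertAll_splice (links : List String) : ∀ (lines : List String) (k : Nat),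
    k ≤ lines.length →
    pvInsertAll links lines (k : Int) = lines.take k ++ links ++ lines.drop k := by
  induction links with
  | nil => intro lines k h; simp [pvInsertAll]
  | cons link rest ih =>
    intro lines k h
    have hins := PySem.List.insert_natCast lines k link h
    show (List.foldl _ (PySem.List.insert lines (k : Int) link, (k : Int) + 1) rest).1 = _
    rw [hins]
    have hcast : ((k : Int) + 1) = ((k + 1 : Nat) : Int) := by push_cast; ring
    rw [hcast]
    have hlen : k + 1 ≤ (lines.take k ++ link :: lines.drop k).length := by
      simp; omega
    have hih := ih (lines.take k ++ link :: lines.drop k) (k + 1) hlen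
    rw [show (List.foldl (fun (st : List String × Int) link => (PySem.List.insert st.1 st.2 link, st.2 + 1)) (lines.take k ++ link :: lines.drop k, ((k + 1 : Nat) : Int)) rest).1 = pvInsertAll rest (lines.take k ++ link :: lines.drop k) ((k + 1 : Nat) : Int) from rfl, hih]
    have hlk : (lines.take k).length = k := by simp; omega
    rw [List.take_append, List.drop_append, hlk]
    simp [List.take_take]

theorem pvInsertAll_splice' (links lines : List String) (idx : Int) (k : Nat)
    (hidx : idx = (k : Int)) (h : k ≤ lines.length) :
    pvInsertAll links lines idx = lines.take k ++ links ++ lines.drop k := by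
  rw [hidx]; exact pvInsertAll_splice links lines k h

theorem pvStream_true (pattern : String) (links : List String) : ∀ (ls : List String),
    pvStream pattern links ls true = (ls, true) := by
  intro ls
  induction ls with
  | nil => rfl
  | cons l ls ih => simp [pvStream, ih]

-- the two list-level computations agree
theorem core_eq (pattern : String) (links : List String) (auto_create : Bool) :
    ∀ (ls : List String),
      (let fi := pvFind pattern ls 0
       let st :=
         if !fi.1 && auto_create then
           ((ls ++ ["", pattern, ""]), ((ls ++ ["", pattern, ""]).length : Int))
         else (ls, fi.2)
       if st.2 ≥ 0 then pvInsertAll links st.1 st.2 else st.1)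
      =
      (let r := pvStream pattern links ls false
       if !r.2 && auto_create then r.1 ++ (["", pattern, ""] ++ links) else r.1) := by
  intro ls
  induction ls with
  | nil =>
    cases auto_create with
    | false => simp [pvFind, pvStream]
    | true =>
      have h := pvInsertAll_splice links ["", pattern, ""] 3 (by simp)
      norm_num at h
      simp [pvFind, pvStream, h]
  | cons l ls ih =>
    by_cases hm : (PySem.Str.strip l == pattern) = true
    · -- head matches: A inserts at index 1, B injects right after l
      have h := pvInsertAll_splice links (l :: ls) 1 (by simp)
      norm_num at h
      simp [pvFind, pvStream, hm, pvStream_true, h]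
    · -- head does not match: both sides are l :: (their value on ls)
      have hk0 : pvFirstIdx pattern (l :: ls) = (pvFirstIdx pattern ls).map (· + 1) := by
        simp [pvFirstIdx, hm]
      cases hk : pvFirstIdx pattern ls with
      | some k =>
        have hklt := pvFirstIdx_lt pattern ls k hk
        have hk' : pvFirstIdx pattern (l :: ls) = some (k + 1) := by rw [hk0, hk]; rfl
        have hge1 : (0 : Int) + ((k : Nat) : Int) + 1 ≥ 0 := by positivity
        have hge2 : (0 : Int) + ((k + 1 : Nat) : Int) + 1 ≥ 0 := by positivity
        have hA2 := pvInsertAll_splice' links (l :: ls) (0 + ((k + 1 : Nat) : Int) + 1) (k + 2)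
          (by push_cast; ring) (by simp only [List.length_cons]; omega)
        have hA1 := pvInsertAll_splice' links ls (0 + ((k : Nat) : Int) + 1) (k + 1)
          (by push_cast; ring) (by omega)
        rw [pvFind_eq] at ih ⊢
        rw [hk'] at ⊢; rw [hk] at ih
        simp only [pvStream, hm] at ih ⊢
        cases hb : pvStream pattern links ls false with
        | mk out found =>
          simp only [hb] at ih ⊢
          simp only [Bool.not_true, Bool.false_and, Bool.false_eq_true, if_false,
            Bool.and_eq_true] at ih ⊢
          simp at ih ⊢
          cases found <;> cases auto_create <;>
            simp_all [List.take_succ_cons, List.drop_succ_cons]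
      | none =>
        have hk' : pvFirstIdx pattern (l :: ls) = none := by rw [hk0, hk]; rfl
        rw [pvFind_eq] at ih ⊢
        rw [hk'] at ⊢; rw [hk] at ih
        simp only [pvStream, hm] at ih ⊢
        cases hb : pvStream pattern links ls false with
        | mk out found =>
          simp only [hb] at ih ⊢
          cases auto_create with
          | false =>
            simp only [Bool.and_false] at ih ⊢
            simp at ih ⊢
            cases found <;> simp_all
          | true =>
            have hA2 := pvInsertAll_splice' links ((l :: ls) ++ ["", pattern, ""])
              ((((l :: ls) ++ ["", pattern, ""]).length : Nat) : Int)
              ((l :: ls) ++ ["", pattern, ""]).length rfl (le_refl _)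
            have hA1 := pvInsertAll_splice' links (ls ++ ["", pattern, ""])
              (((ls ++ ["", pattern, ""]).length : Nat) : Int)
              (ls ++ ["", pattern, ""]).length rfl (le_refl _)
            simp only [List.take_length, List.drop_length, List.append_nil] at hA1 hA2
            simp at ih
            simp
            have hp1 : (0 : Int) ≤ (ls.length : Int) + 3 := by positivity
            have hp2 : (0 : Int) ≤ (ls.length : Int) + 3 + 1 := by positivity
            cases found <;> simp_all

-- ===== VERDICT (by name: the statement is the Claim_ definition above) =====
theorem add_links_to_section_spec : Claim_equal_add_links_to_section := by
  intro content section_name links auto_create _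
  unfold Spec_add_links_to_section add_links_to_section add_links_to_section_alt
  exact congrArg (PySem.Str.join "\n")
    (core_eq ("## " ++ section_name) links auto_create ((PySem.Str.split? content "\n").getD []))
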